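-- pv_equiv track=rewrite | github.com/LuizFJP/Death-Math | src/my-env/DeathMath.py | sumPoints
-- ===== SOURCE A (Python) =====
-- def sumPoints(expression):
--   singsOfSum = expression.count('+')
--   sum = 0
--   weight = 2
--   while(singsOfSum != 0):
--     sum += weight
--     singsOfSum -= 1
--     if weight != 1:
--       weight -= 1
--   return sum
-- ===== SOURCE B (Python) =====
-- def sumPoints(expression):
--   c = expression.count('+')
--   return 0 if c == 0 else c + 1
-- ===== Notes on version B (the rewrite author's own statement) =====
-- stated objective: simpler
-- what changed: Replaces A's decrementing while-loop with weight bookkeeping by a closed form: count the plus signs once and return 0 for a zero count, else count+1.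
import Mathlib
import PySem

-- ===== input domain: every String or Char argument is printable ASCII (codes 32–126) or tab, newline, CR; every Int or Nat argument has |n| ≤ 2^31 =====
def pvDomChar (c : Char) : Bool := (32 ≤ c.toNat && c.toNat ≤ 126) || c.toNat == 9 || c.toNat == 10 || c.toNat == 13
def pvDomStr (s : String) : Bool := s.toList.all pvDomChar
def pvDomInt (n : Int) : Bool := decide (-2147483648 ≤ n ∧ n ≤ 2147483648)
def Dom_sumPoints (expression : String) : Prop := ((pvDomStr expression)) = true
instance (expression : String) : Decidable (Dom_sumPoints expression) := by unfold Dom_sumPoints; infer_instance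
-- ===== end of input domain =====

-- B replaces A's decrementing while-loop with the closed form 0 / count+1 (simpler).

-- ===== PORT A =====
-- the while-loop of A, recursing on the remaining count (it decreases by 1 each pass)
def sumPointsLoop : Nat → Int → Int → Int
  | 0, s, _ => s
  | n + 1, s, w => sumPointsLoop n (s + w) (if w ≠ 1 then w - 1 else w)

def sumPoints (expression : String) : Int :=
  sumPointsLoop (PySem.Str.count expression "+") 0 2

-- ===== PORT B =====
def sumPoints_alt (expression : String) : Int :=
  let c : Int := (PySem.Str.count expression "+" : Nat)
  if c = 0 then 0 else c + 1

-- ===== PRECONDITION & SPEC =====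
def Spec_sumPoints (expression : String) (out : Int) : Prop := out = sumPoints_alt expression
instance (expression : String) (out : Int) : Decidable (Spec_sumPoints expression out) := by unfold Spec_sumPoints; infer_instance

-- ===== CLAIM (what is proved, stated in full; the proofs are below) =====
def Claim_equal_sumPoints : Prop := ∀ (expression : String), Dom_sumPoints expression → Spec_sumPoints expression (sumPoints expression)

-- ===== LEMMAS AND PROOFS =====
theorem sumPointsLoop_weight_one (n : Nat) (s : Int) :
    sumPointsLoop n s 1 = s + n := by
  induction n generalizing s with
  | zero => simp [sumPointsLoop]
  | succ k ih => simp [sumPointsLoop, ih]; ring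

theorem sumPointsLoop_closed (n : Nat) :
    sumPointsLoop n 0 2 = if (n : Int) = 0 then 0 else (n : Int) + 1 := by
  cases n with
  | zero => simp [sumPointsLoop]
  | succ k =>
    have : sumPointsLoop (k + 1) 0 2 = sumPointsLoop k 2 1 := by
      simp [sumPointsLoop]
    rw [this, sumPointsLoop_weight_one]
    have : ((k : Int) + 1) ≠ 0 := by positivity
    push_cast
    simp [this]
    ring

-- ===== VERDICT (by name: the statement is the Claim_ definition above) =====
theorem sumPoints_spec : Claim_equal_sumPoints := by
  intro e _
  unfold Spec_sumPoints sumPoints sumPoints_alt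
  simpa using sumPointsLoop_closed (PySem.Str.count e "+")
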